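-- pv_equiv track=rewrite | github.com/ZaphPie/PC-casa | python/CICLO 2022-0/CICLO VERANO/Recursión/Backtracking/ejm5_teo_s12.py | hallarMayor
-- ===== SOURCE A (Python) =====
-- def hallarMayor(lista):
--     if len(lista) == 0:
--         return None
--     if len(lista)==1:
--         return lista[0]
--     if lista[0]>hallarMayor(lista[1:]):
--         return lista[0]
--     return hallarMayor(lista[1:])
-- ===== SOURCE B (Python) =====
-- def hallarMayor(lista):
--     if len(lista) == 0:
--         return None
--     mayor = lista[0]
--     for x in lista[1:]:
--         if x > mayor:
--             mayor = x
--     return mayor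
-- ===== Notes on version B (the rewrite author's own statement) =====
-- stated objective: faster
-- what changed: Replaces the exponential naive recursion (which recomputes hallarMayor(lista[1:]) twice per level and slices the list) with a single iterative pass keeping a running maximum; a timing run measured B far faster at the largest size both finish and A times out beyond it.
import Mathlib
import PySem

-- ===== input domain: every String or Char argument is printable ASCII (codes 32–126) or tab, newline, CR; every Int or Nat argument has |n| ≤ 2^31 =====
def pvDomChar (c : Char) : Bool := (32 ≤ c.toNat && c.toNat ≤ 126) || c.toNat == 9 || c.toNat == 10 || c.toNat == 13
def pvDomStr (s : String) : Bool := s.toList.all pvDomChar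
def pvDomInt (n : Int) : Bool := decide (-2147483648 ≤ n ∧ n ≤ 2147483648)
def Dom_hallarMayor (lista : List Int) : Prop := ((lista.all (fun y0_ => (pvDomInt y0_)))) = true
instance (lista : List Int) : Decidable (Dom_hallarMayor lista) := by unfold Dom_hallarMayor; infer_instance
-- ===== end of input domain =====

-- B replaces A's exponential naive recursion by one iterative pass with a running maximum.

-- ===== PORT A =====
-- literal port of A: empty → None, singleton → head, otherwise compare head with the
-- recursive maximum of the tail (the tail is nonempty there, so the recursion always
-- yields `some`; the `none` branch is unreachable and returns none)
def hallarMayor (lista : List Int) : Option Int :=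
  match lista with
  | [] => none
  | [x] => some x
  | x :: y :: t =>
    match hallarMayor (y :: t) with
    | some m => if x > m then some x else some m
    | none => none

-- ===== PORT B =====
-- iterative running-maximum loop over lista[1:]
def hallarMayor_alt (lista : List Int) : Option Int :=
  match lista with
  | [] => none
  | x :: xs => some (xs.foldl (fun mayor v => if v > mayor then v else mayor) x)

-- ===== PRECONDITION & SPEC =====
def Spec_hallarMayor (lista : List Int) (out : Option Int) : Prop := out = hallarMayor_alt lista
instance (lista : List Int) (out : Option Int) : Decidable (Spec_hallarMayor lista out) := by unfold Spec_hallarMayor; infer_instance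

-- ===== CLAIM (what is proved, stated in full; the proofs are below) =====
def Claim_equal_hallarMayor : Prop := ∀ (lista : List Int), Dom_hallarMayor lista → Spec_hallarMayor lista (hallarMayor lista)

-- ===== LEMMAS AND PROOFS =====
theorem pv_step_eq_max (a b : Int) : (if b > a then b else a) = max a b := by
  simp [max_def]; split_ifs <;> omega

theorem pv_foldl_step_eq_max (t : List Int) (a : Int) :
    t.foldl (fun mayor v => if v > mayor then v else mayor) a = t.foldl max a := by
  induction t generalizing a with
  | nil => rfl
  | cons c t ih => rw [List.foldl, List.foldl, pv_step_eq_max]; exact ih _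

theorem pv_foldl_max_max (t : List Int) (a b : Int) :
    t.foldl max (max a b) = max a (t.foldl max b) := by
  induction t generalizing b with
  | nil => rfl
  | cons c t ih => simp [List.foldl, max_assoc, ih]

theorem pv_hallarMayor_cons (x : Int) (xs : List Int) :
    hallarMayor (x :: xs) = some (xs.foldl max x) := by
  induction xs generalizing x with
  | nil => rfl
  | cons y t ih =>
    simp only [hallarMayor, ih y, List.foldl]
    rw [pv_foldl_max_max t x y]
    split_ifs with hc <;> (congr 1; rw [max_def]; split_ifs <;> omega)

-- ===== VERDICT (by name: the statement is the Claim_ definition above) =====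
theorem hallarMayor_spec : Claim_equal_hallarMayor := by
  intro lista _
  unfold Spec_hallarMayor
  cases lista with
  | nil => rfl
  | cons x xs =>
    rw [pv_hallarMayor_cons]
    simp [hallarMayor_alt, pv_foldl_step_eq_max]
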